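-- pv_equiv track=rewrite | github.com/rohhithguna/EnergyIntelligence | main.py | _drop_clusters
-- ===== SOURCE A (Python) =====
-- def _drop_clusters(drops):
--     if not drops:
--         return []
--     idx = sorted(int(d["index"]) for d in drops)
--     clusters = []
--     start = idx[0]
--     prev = idx[0]
--     for item in idx[1:]:
--         if item == prev + 1:
--             prev = item
--             continue
--         clusters.append({"start_index": start, "end_index": prev, "count": (prev - start + 1)})
--         start = item
--         prev = item
--     clusters.append({"start_index": start, "end_index": prev, "count": (prev - start + 1)})
--     return clusters
-- ===== SOURCE B (Python) =====
-- def _drop_clusters(drops):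
--     idx = sorted(int(d["index"]) for d in drops)
--     n = len(idx)
--     cuts = [i for i in range(1, n) if idx[i] != idx[i - 1] + 1]
--     bounds = ([0] + cuts + [n]) if n else []
--     return [
--         {"start_index": idx[a], "end_index": idx[b - 1], "count": idx[b - 1] - idx[a] + 1}
--         for a, b in zip(bounds, bounds[1:])
--     ]
-- ===== Notes on version B (the rewrite author's own statement) =====
-- stated objective: alternative
-- what changed: Replaces A's prev/start state-machine fold with staged passes: first compute the list of break positions i where idx[i] != idx[i-1]+1, form a boundary list [0]+cuts+[n], then zip adjacent boundaries and map each segment to its cluster dict; no running state or trailing append.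
import Mathlib
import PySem

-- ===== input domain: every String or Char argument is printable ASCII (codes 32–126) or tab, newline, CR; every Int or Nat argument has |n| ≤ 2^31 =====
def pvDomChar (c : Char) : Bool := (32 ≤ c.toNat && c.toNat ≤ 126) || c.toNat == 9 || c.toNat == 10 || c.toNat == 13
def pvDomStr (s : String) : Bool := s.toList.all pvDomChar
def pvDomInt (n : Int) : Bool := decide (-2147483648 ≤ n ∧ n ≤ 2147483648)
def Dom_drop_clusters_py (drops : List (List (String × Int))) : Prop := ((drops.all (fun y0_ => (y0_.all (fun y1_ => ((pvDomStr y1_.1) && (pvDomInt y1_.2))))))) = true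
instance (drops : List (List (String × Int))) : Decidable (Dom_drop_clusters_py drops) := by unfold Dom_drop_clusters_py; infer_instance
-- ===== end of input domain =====

-- B replaces A's prev/start state-machine loop by staged passes: compute the break
-- positions, form a boundary list, then zip adjacent boundaries into clusters ("alternative").

-- ===== PORT A =====
-- d["index"] raises KeyError when the key is missing; Pre_ excludes that, the port reads getD 0 there.
def drop_clusters_py (drops : List (List (String × Int))) : List (List (String × Int)) :=
  if drops = [] then []
  else
    let idx := PySem.List.sorted (drops.map (fun d => (PySem.Dict.get? (PySem.Dict.mk d) "index").getD 0)) (fun x => x)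
    match idx with
    | [] => []   -- unreachable: drops ≠ [] makes idx nonempty
    | x :: rest =>
      let st := rest.foldl
        (fun (acc : List (List (String × Int)) × Int × Int) item =>
          if item = acc.2.2 + 1 then (acc.1, acc.2.1, item)
          else (acc.1 ++ [[("start_index", acc.2.1), ("end_index", acc.2.2), ("count", acc.2.2 - acc.2.1 + 1)]], item, item))
        ([], x, x)
      st.1 ++ [[("start_index", st.2.1), ("end_index", st.2.2), ("count", st.2.2 - st.2.1 + 1)]]

-- ===== PORT B =====
-- `[i for i in range(1, n) if idx[i] != idx[i-1] + 1]`; indices are in range, so getD 0 is exact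
def pvCuts (idx : List Int) : List Nat :=
  (List.range' 1 (idx.length - 1)).filter (fun i => !(idx.getD i 0 == idx.getD (i - 1) 0 + 1))

-- `([0] + cuts + [n]) if n else []`
def pvBounds (idx : List Int) : List Nat :=
  if idx.length = 0 then [] else 0 :: (pvCuts idx ++ [idx.length])

-- the cluster dict literal {"start_index": s, "end_index": e, "count": e - s + 1}
def pvMkCl (s e : Int) : List (String × Int) :=
  [("start_index", s), ("end_index", e), ("count", e - s + 1)]

def drop_clusters_py_alt (drops : List (List (String × Int))) : List (List (String × Int)) :=
  let idx := PySem.List.sorted (drops.map (fun d => (PySem.Dict.get? (PySem.Dict.mk d) "index").getD 0)) (fun x => x)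
  let bounds := pvBounds idx
  (bounds.zip bounds.tail).map (fun p => pvMkCl (idx.getD p.1 0) (idx.getD (p.2 - 1) 0))

-- ===== PRECONDITION & SPEC =====
-- Pre_ excludes exactly the inputs where d["index"] raises KeyError (a dict without the "index" key).
def Pre_drop_clusters_py (drops : List (List (String × Int))) : Prop :=
  ∀ d ∈ drops, ((PySem.Dict.get? (PySem.Dict.mk d) "index").isSome = true)
instance (drops : List (List (String × Int))) : Decidable (Pre_drop_clusters_py drops) := by
  unfold Pre_drop_clusters_py; infer_instance

def pvWitness_drop_clusters_py : (List (List (String × Int))) := [[("index", 3)], [("index", 5)]]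

def Spec_drop_clusters_py (drops : List (List (String × Int))) (out : List (List (String × Int))) : Prop := out = drop_clusters_py_alt drops
instance (drops : List (List (String × Int))) (out : List (List (String × Int))) : Decidable (Spec_drop_clusters_py drops out) := by unfold Spec_drop_clusters_py; infer_instance

-- ===== CLAIM (what is proved, stated in full; the proofs are below) =====
def Claim_equal_drop_clusters_py : Prop := ∀ (drops : List (List (String × Int))), Dom_drop_clusters_py drops → Pre_drop_clusters_py drops → Spec_drop_clusters_py drops (drop_clusters_py drops)

-- ===== LEMMAS AND PROOFS =====

-- length of the maximal consecutive run following p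
def cpRun (p : Int) : List Int → Nat
  | [] => 0
  | y :: ys => if y = p + 1 then cpRun y ys + 1 else 0

-- canonical cluster list of a value sequence
def runsSpec (s p : Int) : List Int → List (List (String × Int))
  | [] => [pvMkCl s p]
  | y :: ys => if y = p + 1 then runsSpec s y ys else pvMkCl s p :: runsSpec y y ys

def runsTail : List Int → List (List (String × Int))
  | [] => []
  | x :: xs => runsSpec x x xs

theorem runsTail_cons (x : Int) (xs : List Int) : runsTail (x :: xs) = runsSpec x x xs := rfl

def stepA (acc : List (List (String × Int)) × Int × Int) (item : Int) :
    List (List (String × Int)) × Int × Int :=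
  if item = acc.2.2 + 1 then (acc.1, acc.2.1, item)
  else (acc.1 ++ [[("start_index", acc.2.1), ("end_index", acc.2.2), ("count", acc.2.2 - acc.2.1 + 1)]], item, item)

theorem foldA_eq (xs : List Int) : ∀ (cl : List (List (String × Int))) (s p : Int),
    (xs.foldl stepA (cl, s, p)).1 ++
      [[("start_index", (xs.foldl stepA (cl, s, p)).2.1),
        ("end_index", (xs.foldl stepA (cl, s, p)).2.2),
        ("count", (xs.foldl stepA (cl, s, p)).2.2 - (xs.foldl stepA (cl, s, p)).2.1 + 1)]]
    = cl ++ runsSpec s p xs := by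
  induction xs with
  | nil => intro cl s p; simp [runsSpec, pvMkCl]
  | cons y ys ih =>
    intro cl s p
    by_cases h : y = p + 1
    · simp only [List.foldl_cons, stepA, if_pos h, runsSpec]
      exact ih cl s y
    · simp only [List.foldl_cons, stepA, if_neg h, runsSpec]
      have := ih (cl ++ [[("start_index", s), ("end_index", p), ("count", p - s + 1)]]) y y
      simpa [pvMkCl, List.append_assoc] using this

theorem cpRun_le (p : Int) (xs : List Int) : cpRun p xs ≤ xs.length := by
  induction xs generalizing p with
  | nil => simp [cpRun]
  | cons y ys ih =>
    simp only [cpRun]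
    split_ifs with h
    · have := ih y; simp; omega
    · simp

-- values along the run: (x :: rest)[i] = x + i for i ≤ cpRun x rest
theorem cp_getD (rest : List Int) : ∀ (x : Int) (i : Nat), i ≤ cpRun x rest →
    (x :: rest).getD i 0 = x + i := by
  induction rest with
  | nil => intro x i h; simp [cpRun] at h; subst h; simp
  | cons y ys ih =>
    intro x i h
    match i with
    | 0 => simp
    | j + 1 =>
      simp only [cpRun] at h
      split_ifs at h with hy
      · have hj : j ≤ cpRun y ys := by omega
        have := ih y j hj
        simp only [List.getD_cons_succ] at this ⊢
        rw [this, hy]; push_cast; ring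
      · omega

-- the run really stops: rest[cpRun x rest] ≠ x + cpRun x rest + 1
theorem cp_stop (rest : List Int) : ∀ (x : Int), cpRun x rest < rest.length →
    rest.getD (cpRun x rest) 0 ≠ x + cpRun x rest + 1 := by
  induction rest with
  | nil => intro x h; simp at h
  | cons y ys ih =>
    intro x h
    by_cases hy : y = x + 1
    · simp only [cpRun, if_pos hy] at h ⊢
      have := ih y (by simpa using h)
      simp only [List.getD_cons_succ]
      intro hc
      apply this
      rw [hc, hy]; push_cast; ring
    · simp only [cpRun, if_neg hy, List.getD_cons_zero]
      intro hc; exact hy (by omega)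

theorem getD_drop' (l : List Int) (k j : Nat) : (l.drop k).getD j 0 = l.getD (k + j) 0 := by
  simp [List.getD, List.getElem?_drop]

theorem filter_map_shift (l : List Nat) (k : Nat) (p q : Nat → Bool)
    (h : ∀ i ∈ l, p (i + k) = q i) :
    (l.map (· + k)).filter p = (l.filter q).map (· + k) := by
  induction l with
  | nil => rfl
  | cons a as ih =>
    simp only [List.map_cons, List.filter_cons, h a (by simp)]
    rw [ih (fun i hi => h i (by simp [hi]))]
    split <;> simp

-- splitting of the cut list at the first run
theorem pvCuts_split (x : Int) (rest : List Int) :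
    pvCuts (x :: rest) =
      if _h : cpRun x rest < rest.length then
        (cpRun x rest + 1) :: (pvCuts ((x :: rest).drop (cpRun x rest + 1))).map (· + (cpRun x rest + 1))
      else [] := by
  have hc := cpRun_le x rest
  set c := cpRun x rest with hcdef
  have hlen : (x :: rest).length - 1 = rest.length := by simp
  have hsplit : List.range' 1 rest.length = List.range' 1 c ++ List.range' (1 + c) (rest.length - c) := by
    have h := List.range'_append (s := 1) (m := c) (n := rest.length - c) (step := 1)
    simp only [Nat.one_mul] at h
    rw [Nat.add_sub_cancel' hc] at h
    exact h.symm
  have hrunval : ∀ i : Nat, i ≤ c → (x :: rest).getD i 0 = x + i := fun i hi => cp_getD rest x i hi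
  have hfilter1 : (List.range' 1 c).filter
      (fun i => !((x :: rest).getD i 0 == (x :: rest).getD (i - 1) 0 + 1)) = [] := by
    rw [List.filter_eq_nil_iff]
    intro i hi
    have hmem := List.mem_range'_1.mp hi
    have h1 : 1 ≤ i := hmem.1
    have h2 : i ≤ c := by omega
    have e1 := hrunval i h2
    have e2 := hrunval (i - 1) (by omega)
    simp only [e1, e2]
    simp
    omega
  unfold pvCuts
  rw [hlen, hsplit, List.filter_append, hfilter1, List.nil_append]
  by_cases h : c < rest.length
  · rw [dif_pos h]
    have hone : rest.length - c = (rest.length - c - 1) + 1 := by omega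
    rw [hone, List.range'_succ]
    have hcut : (!((x :: rest).getD (1 + c) 0 == (x :: rest).getD (1 + c - 1) 0 + 1)) = true := by
      have hs : (x :: rest).getD (1 + c) 0 = rest.getD c 0 := by
        rw [show 1 + c = c + 1 by omega]; simp
      have hstop := cp_stop rest x h
      rw [← hcdef] at hstop
      have he := hrunval (1 + c - 1) (by omega)
      simp only [hs, he]
      simp
      intro hc2
      exact hstop (by simpa [List.getD] using hc2)
    rw [List.filter_cons, if_pos hcut]
    rw [show 1 + c = c + 1 by omega]
    congr 1
    -- remaining positions are the shifted cuts of the dropped tail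
    have hdl : ((x :: rest).drop (c + 1)).length = rest.length - c := by
      simp only [List.length_drop, List.length_cons]; omega
    rw [hdl]
    have hmap : List.range' (c + 1 + 1) (rest.length - c - 1)
        = (List.range' 1 (rest.length - c - 1)).map (· + (c + 1)) := by
      rw [List.range'_eq_map_range, List.range'_eq_map_range, List.map_map]
      apply List.map_congr_left
      intro a _; simp; omega
    rw [hmap, filter_map_shift]
    intro i hi
    have hmem := List.mem_range'_1.mp hi
    have h1 : 1 ≤ i := hmem.1
    have g1 : (x :: rest).getD (i + (c + 1)) 0 = (List.drop (c + 1) (x :: rest)).getD i 0 := by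
      rw [show i + (c + 1) = (c + 1) + i by omega, ← getD_drop']
    have g2 : (x :: rest).getD (i + (c + 1) - 1) 0 = (List.drop (c + 1) (x :: rest)).getD (i - 1) 0 := by
      rw [show i + (c + 1) - 1 = (c + 1) + (i - 1) by omega, ← getD_drop']
    rw [g1, g2]
  · rw [dif_neg h]
    rw [show rest.length - c = 0 by omega]
    rfl

-- every boundary after the head is ≥ 1
theorem pvBounds_tail_pos (idx : List Int) : ∀ b ∈ (pvBounds idx).tail, 1 ≤ b := by
  unfold pvBounds
  split
  · simp
  · intro b hb
    simp only [List.tail_cons, List.mem_append, List.mem_singleton] at hb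
    rcases hb with hb | hb
    · unfold pvCuts at hb
      have := List.mem_range'_1.mp (List.mem_of_mem_filter hb)
      omega
    · subst hb; rename_i h; omega

theorem runsSpec_eq (xs : List Int) : ∀ (s p : Int),
    runsSpec s p xs = pvMkCl s (p + (cpRun p xs : Int)) :: runsTail (xs.drop (cpRun p xs)) := by
  induction xs with
  | nil => intro s p; simp [runsSpec, cpRun, runsTail]
  | cons y ys ih =>
    intro s p
    by_cases h : y = p + 1
    · simp only [runsSpec, if_pos h, cpRun]
      rw [ih s y]
      have hv : p + ((cpRun y ys + 1 : Nat) : Int) = y + (cpRun y ys : Int) := by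
        push_cast; omega
      rw [hv]
      simp
    · simp only [runsSpec, if_neg h, cpRun, runsTail]
      simp

-- the B-side cluster builder
def clB (idx : List Int) : List (List (String × Int)) :=
  ((pvBounds idx).zip (pvBounds idx).tail).map (fun p => pvMkCl (idx.getD p.1 0) (idx.getD (p.2 - 1) 0))

theorem clB_eq_aux (n : Nat) : ∀ (idx : List Int), idx.length ≤ n → clB idx = runsTail idx := by
  induction n with
  | zero =>
    intro idx h
    have : idx = [] := List.eq_nil_of_length_eq_zero (by omega)
    subst this; rfl
  | succ n ih =>
    intro idx hlen
    match idx with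
    | [] => rfl
    | x :: rest =>
      set c := cpRun x rest with hcdef
      have hc := cpRun_le x rest
      have hrunval : ∀ i : Nat, i ≤ c → (x :: rest).getD i 0 = x + i := fun i hi => cp_getD rest x i hi
      rw [runsTail_cons, runsSpec_eq, ← hcdef]
      by_cases h : c < rest.length
      · -- bounds = 0 :: map (+(c+1)) (bounds of the dropped tail)
        set idx' := (x :: rest).drop (c + 1) with hidx'
        have hdropc : rest.drop c = idx' := by simp [hidx']
        have hlen' : idx'.length = rest.length - c := by
          rw [hidx']; simp only [List.length_drop, List.length_cons]; omega
        have hne' : idx'.length ≠ 0 := by omega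
        have hP : pvBounds idx' = 0 :: (pvCuts idx' ++ [idx'.length]) := by
          unfold pvBounds; rw [if_neg hne']
        have hb : pvBounds (x :: rest) = 0 :: (pvBounds idx').map (· + (c + 1)) := by
          rw [hP]
          unfold pvBounds
          rw [if_neg (by simp)]
          rw [pvCuts_split, dif_pos h, ← hcdef, ← hidx']
          simp only [List.map_cons, List.map_append, List.map_nil, Nat.zero_add]
          rw [List.cons_append]
          have hlast : (x :: rest).length = idx'.length + (c + 1) := by
            simp only [List.length_cons, hlen']; omega
          rw [hlast]
        have hTpos : ∀ b ∈ pvCuts idx' ++ [idx'.length], 1 ≤ b := by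
          have := pvBounds_tail_pos idx'
          rw [hP] at this
          simpa using this
        unfold clB
        rw [hb, hP]
        simp only [List.map_cons, List.map_append, List.map_nil, List.tail_cons,
          List.zip_cons_cons, List.map_cons, Nat.zero_add]
        congr 1
        · -- head cluster
          simp only [List.getD_cons_zero]
          rw [show c + 1 - 1 = c by omega, hrunval c le_rfl]
        · -- tail clusters: shift and apply the IH
          set T := pvCuts idx' ++ [idx'.length] with hT
          have hshape : ((c + 1) :: (List.map (fun b => b + (c + 1)) (pvCuts idx')
                ++ [idx'.length + (c + 1)])) = (0 :: T).map (· + (c + 1)) := by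
            simp [hT]
          rw [hshape, show (List.map (fun b => b + (c + 1)) (pvCuts idx')
                ++ [idx'.length + (c + 1)]) = T.map (· + (c + 1)) by simp [hT]]
          rw [List.zip_map, List.map_map]
          have hcong : ∀ p ∈ (0 :: T).zip T,
              ((fun p => pvMkCl ((x :: rest).getD p.1 0) ((x :: rest).getD (p.2 - 1) 0)) ∘
                Prod.map (· + (c + 1)) (· + (c + 1))) p
              = pvMkCl (idx'.getD p.1 0) (idx'.getD (p.2 - 1) 0) := by
            intro p hp
            have hp2 : 1 ≤ p.2 := hTpos p.2 (by simpa [hT] using (List.of_mem_zip hp).2)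
            simp only [Function.comp, Prod.map]
            have g1 : (x :: rest).getD (p.1 + (c + 1)) 0 = idx'.getD p.1 0 := by
              rw [show p.1 + (c + 1) = (c + 1) + p.1 by omega, ← getD_drop', ← hidx']
            have g2 : (x :: rest).getD (p.2 + (c + 1) - 1) 0 = idx'.getD (p.2 - 1) 0 := by
              rw [show p.2 + (c + 1) - 1 = (c + 1) + (p.2 - 1) by omega, ← getD_drop', ← hidx']
            rw [g1, g2]
          rw [List.map_congr_left hcong, hdropc]
          have hIH := ih idx' (by
            rw [hlen']
            have hx : rest.length + 1 ≤ n + 1 := by simpa using hlen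
            omega)
          unfold clB at hIH
          rw [hP] at hIH
          simpa [hT] using hIH
      · -- single run covering everything: bounds = [0, n], one cluster
        have hcr : c = rest.length := by omega
        have hcuts : pvCuts (x :: rest) = [] := by rw [pvCuts_split, dif_neg (by omega)]
        unfold clB pvBounds
        rw [if_neg (by simp), hcuts]
        simp only [List.nil_append, List.tail_cons, List.zip_cons_cons, List.zip_nil_right, List.map_cons, List.map_nil]
        have hv : (x :: rest).getD ((x :: rest).length - 1) 0 = x + c := by
          have : (x :: rest).length - 1 = c := by simp [hcr]
          rw [this]; exact hrunval c le_rfl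
        rw [hv]
        simp only [List.getD_cons_zero]
        have hdrop : rest.drop c = [] := List.drop_eq_nil_of_le (by omega)
        rw [hdrop]
        rfl

theorem clB_eq (idx : List Int) : clB idx = runsTail idx := clB_eq_aux idx.length idx le_rfl

-- ===== VERDICT (by name: the statement is the Claim_ definition above) =====
theorem drop_clusters_py_spec : Claim_equal_drop_clusters_py := by
  intro drops _ _
  unfold Spec_drop_clusters_py
  simp only [drop_clusters_py, drop_clusters_py_alt]
  have halt : ∀ idx : List Int,
      ((pvBounds idx).zip (pvBounds idx).tail).map
        (fun p => pvMkCl (idx.getD p.1 0) (idx.getD (p.2 - 1) 0)) = runsTail idx := fun idx => clB_eq idx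
  by_cases hnil : drops = []
  · subst hnil
    have hs : PySem.List.sorted (([] : List (List (String × Int))).map
        (fun d => (PySem.Dict.get? (PySem.Dict.mk d) "index").getD 0)) (fun x => x) = [] := by
      rw [PySem.List.sorted_eq_nil_iff]; rfl
    rw [if_pos rfl, hs]
    exact (halt []).symm
  · rw [if_neg hnil]
    have hne : PySem.List.sorted (drops.map
        (fun d => (PySem.Dict.get? (PySem.Dict.mk d) "index").getD 0)) (fun x => x) ≠ [] := by
      rw [Ne, PySem.List.sorted_eq_nil_iff, List.map_eq_nil_iff]; exact hnil
    revert hne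
    generalize PySem.List.sorted (drops.map
        (fun d => (PySem.Dict.get? (PySem.Dict.mk d) "index").getD 0)) (fun x => x) = idx
    intro hne
    rw [halt idx]
    obtain ⟨x, rest, rfl⟩ := List.exists_cons_of_ne_nil hne
    rw [runsTail_cons]
    exact foldA_eq rest [] x x
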